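-- pv_equiv track=rewrite | github.com/theycallmeninx/py-challenges | maximizeit/maximize.py | _find_max_modulo
-- ===== SOURCE A (Python) =====
-- def _build_recursive_sums(lines, values=None):
--     """ recursively loop through each list of each line to build a list of integers.
--
--     Examples:
--          lines = [[1], [2,3], [4,5]] -> [[1,2,4], [1,2,5], [1,3,4], [1,3,5]]
--
--     Args:
--         lines: nested list of integer lists
--         values: the values already collected from higher up the tree
--
--     Yields:
--         list: the integers of each list that was
--     """
--     if values is None:
--         values = []
--     for num in lines[0]:
--         if len(lines) > 1:
--             yield from _build_recursive_sums(lines[1:], values + [num])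
--         else:
--             yield values + [num]
--
-- def _find_max_modulo(lines: list, modulo: int) -> int:
--     """ Finds the maximum modulo value from the provided list of lines.
--
--     Args:
--         lines: A nested list of integer lists to find the max modulo value
--
--     Returns:
--         int: the max modulo value
--     """
--     lookup = {}
--     max_modulo = 0
--     for iter_sum in _build_recursive_sums(lines=lines):
--         total = sum(iter_sum)
--         if total not in lookup:
--             calc_modulo = total % modulo
--             lookup[total] = calc_modulo
--             if calc_modulo > max_modulo:
--                 max_modulo = calc_modulo
--     return max_modulo
-- ===== SOURCE B (Python) =====
-- def _find_max_modulo(lines: list, modulo: int) -> int: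
--     """DP over achievable residues: one set of residues mod `modulo` carried across lines."""
--     residues = {0}
--     for line in lines:
--         residues = {(r + num) % modulo for r in residues for num in line}
--     return max(residues | {0})
-- ===== Notes on version B (the rewrite author's own statement) =====
-- stated objective: faster
-- what changed: Replaces A's recursive enumeration of every tuple of the Cartesian product (with a dedup dict and a running max) by a dynamic program that carries the single set of achievable residues mod modulo across the lines, then takes its max.
-- outside the precondition, e.g. on _find_max_modulo([[1], []], 0): A returns 0, B raises ZeroDivisionError
import Mathlib
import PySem

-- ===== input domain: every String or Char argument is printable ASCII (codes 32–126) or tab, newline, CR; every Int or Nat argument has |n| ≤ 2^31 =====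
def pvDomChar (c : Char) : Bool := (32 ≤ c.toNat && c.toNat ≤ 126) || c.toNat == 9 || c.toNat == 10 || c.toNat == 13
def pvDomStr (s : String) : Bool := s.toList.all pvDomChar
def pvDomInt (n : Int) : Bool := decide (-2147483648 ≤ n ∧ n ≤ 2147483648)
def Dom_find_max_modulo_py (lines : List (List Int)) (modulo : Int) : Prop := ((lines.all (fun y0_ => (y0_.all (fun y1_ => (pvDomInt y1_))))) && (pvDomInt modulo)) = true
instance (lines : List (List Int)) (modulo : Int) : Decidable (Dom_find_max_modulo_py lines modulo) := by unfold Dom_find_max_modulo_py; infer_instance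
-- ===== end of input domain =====

-- B replaces A's enumeration of every Cartesian-product tuple by a residue-set DP across the lines (objective: faster, asymptotically).

-- ===== PORT A =====
-- port of _build_recursive_sums (generator, collected in yield order); lines = [] is Python's IndexError case (excluded by Pre_)
def buildRecursiveSums : List (List Int) → List Int → List (List Int)
  | [], _ => []
  | l :: rest, values =>
      l.flatMap (fun num =>
        if rest.length + 1 > 1 then buildRecursiveSums rest (values ++ [num])
        else [values ++ [num]])

def find_max_modulo_py (lines : List (List Int)) (modulo : Int) : Int :=
  ((buildRecursiveSums lines []).foldl
    (fun st iter_sum =>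
      let total := iter_sum.sum
      if st.1.contains total then st
      else
        let calc_modulo := PySem.Int.mod total modulo
        let lookup' := st.1.insert total calc_modulo
        if calc_modulo > st.2 then (lookup', calc_modulo) else (lookup', st.2))
    ((PySem.Dict.empty : PySem.Dict Int Int), 0)).2

-- ===== PORT B =====
def find_max_modulo_py_alt (lines : List (List Int)) (modulo : Int) : Int :=
  let residues : PySem.Set Int :=
    lines.foldl
      (fun res line =>
        PySem.Set.ofList (res.flatMap (fun r => line.map (fun num => PySem.Int.mod (r + num) modulo))))
      (PySem.Set.ofList [0])
  match PySem.List.max? (PySem.Set.union residues (PySem.Set.ofList [0])) (fun x => x) with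
  | some v => v
  | none => 0   -- unreachable: the union contains 0

-- ===== PRECONDITION & SPEC =====
-- Pre_ excludes lines == [] (A raises IndexError reading lines[0]; B would return 0 there) and
-- modulo == 0 (whichever program first evaluates a '%' raises ZeroDivisionError — which one that is
-- depends on where the empty rows sit, e.g. on ([[1],[]], 0) A returns 0 while B raises).
def Pre_find_max_modulo_py (lines : List (List Int)) (modulo : Int) : Prop :=
  lines ≠ [] ∧ modulo ≠ 0
instance (lines : List (List Int)) (modulo : Int) : Decidable (Pre_find_max_modulo_py lines modulo) := by
  unfold Pre_find_max_modulo_py; infer_instance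

def pvWitness_find_max_modulo_py : List (List Int) × Int := ([[1, 2], [3]], 5)

def Spec_find_max_modulo_py (lines : List (List Int)) (modulo : Int) (out : Int) : Prop := out = find_max_modulo_py_alt lines modulo
instance (lines : List (List Int)) (modulo : Int) (out : Int) : Decidable (Spec_find_max_modulo_py lines modulo out) := by unfold Spec_find_max_modulo_py; infer_instance

-- ===== CLAIM (what is proved, stated in full; the proofs are below) =====
def Claim_equal_find_max_modulo_py : Prop := ∀ (lines : List (List Int)) (modulo : Int), Dom_find_max_modulo_py lines modulo → Pre_find_max_modulo_py lines modulo → Spec_find_max_modulo_py lines modulo (find_max_modulo_py lines modulo)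


-- ===== LEMMAS AND PROOFS =====

def pvSel (lines : List (List Int)) (u : List Int) : Prop :=
  List.Forall₂ (fun (l : List Int) (n : Int) => n ∈ l) lines u

def pvStepA (modulo : Int) (st : PySem.Dict Int Int × Int) (iter_sum : List Int) :
    PySem.Dict Int Int × Int :=
  let total := iter_sum.sum
  if st.1.contains total then st
  else
    let calc_modulo := PySem.Int.mod total modulo
    let lookup' := st.1.insert total calc_modulo
    if calc_modulo > st.2 then (lookup', calc_modulo) else (lookup', st.2)

def pvStepB (modulo : Int) (res : PySem.Set Int) (line : List Int) : PySem.Set Int :=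
  PySem.Set.ofList (res.flatMap (fun r => line.map (fun num => PySem.Int.mod (r + num) modulo)))

theorem pvA_eq (lines : List (List Int)) (modulo : Int) :
    find_max_modulo_py lines modulo
      = ((buildRecursiveSums lines []).foldl (pvStepA modulo) (PySem.Dict.empty, 0)).2 := rfl

theorem pvB_eq (lines : List (List Int)) (modulo : Int) :
    find_max_modulo_py_alt lines modulo
      = (match PySem.List.max?
            (PySem.Set.union (lines.foldl (pvStepB modulo) (PySem.Set.ofList [0]))
              (PySem.Set.ofList [0])) (fun x => x) with
         | some v => v
         | none => 0) := rfl

theorem pv_bRS_mem (lines : List (List Int)) (h : lines ≠ []) :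
    ∀ (values t : List Int),
      t ∈ buildRecursiveSums lines values ↔ ∃ u, pvSel lines u ∧ t = values ++ u := by
  induction lines with
  | nil => exact absurd rfl h
  | cons l rest ih =>
    intro values t
    cases rest with
    | nil =>
      simp [buildRecursiveSums, pvSel, List.forall₂_cons_left_iff]
    | cons r rs =>
      simp only [buildRecursiveSums, List.mem_flatMap]
      constructor
      · rintro ⟨num, hnum, ht⟩
        rw [if_pos (by simp)] at ht
        obtain ⟨u, hu, rfl⟩ := (ih (by simp) (values ++ [num]) t).1 ht
        exact ⟨num :: u, List.Forall₂.cons hnum hu, by simp⟩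
      · rintro ⟨u, hu, rfl⟩
        cases hu with
        | cons hn hu' =>
          rename_i n u'
          refine ⟨n, hn, ?_⟩
          rw [if_pos (by simp)]
          exact (ih (by simp) _ _).2 ⟨u', hu', by simp⟩

theorem pv_modfold (modulo : Int) :
    ∀ (u : List Int) (a : Int),
      u.foldl (fun acc n => PySem.Int.mod (acc + n) modulo) (PySem.Int.mod a modulo)
        = PySem.Int.mod (a + u.sum) modulo := by
  intro u
  induction u with
  | nil => intro a; simp
  | cons n u' ih =>
    intro a
    simp only [List.foldl_cons, List.sum_cons]
    have : PySem.Int.mod (PySem.Int.mod a modulo + n) modulo = PySem.Int.mod (a + n) modulo := by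
      simp [PySem.Int.mod, Int.fmod_add_fmod]
    rw [this, ih (a + n)]
    ring_nf

theorem pv_dp_mem (modulo : Int) :
    ∀ (lines : List (List Int)) (S : PySem.Set Int) (x : Int),
      x ∈ lines.foldl (pvStepB modulo) S
        ↔ ∃ r ∈ S, ∃ u, pvSel lines u ∧ x = u.foldl (fun acc n => PySem.Int.mod (acc + n) modulo) r := by
  intro lines
  induction lines with
  | nil =>
    intro S x
    simp [pvSel, List.forall₂_nil_left_iff]
  | cons line rest ih =>
    intro S x
    simp only [List.foldl_cons]
    rw [ih]
    constructor
    · rintro ⟨r1, hr1, u, hu, rfl⟩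
      rw [pvStepB, PySem.Set.mem_ofList] at hr1
      simp only [List.mem_flatMap, List.mem_map] at hr1
      obtain ⟨r, hr, num, hnum, rfl⟩ := hr1
      exact ⟨r, hr, num :: u, List.Forall₂.cons hnum hu, by simp⟩
    · rintro ⟨r, hr, u, hu, rfl⟩
      cases hu with
      | cons hn hu' =>
        rename_i n u'
        refine ⟨PySem.Int.mod (r + n) modulo, ?_, u', hu', by simp⟩
        rw [pvStepB, PySem.Set.mem_ofList]
        simp only [List.mem_flatMap, List.mem_map]
        exact ⟨r, hr, n, hn, rfl⟩

theorem pv_fold_keys (modulo : Int) :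
    ∀ (ts : List (List Int)) (d : PySem.Dict Int Int) (mx total : Int),
      (((ts.foldl (pvStepA modulo) (d, mx)).1).get? total).isSome
        ↔ (d.get? total).isSome ∨ total ∈ ts.map List.sum := by
  intro ts
  induction ts with
  | nil => intro d mx total; simp
  | cons t ts ih =>
    intro d mx total
    simp only [List.foldl_cons, List.map_cons, List.mem_cons]
    by_cases hc : d.contains t.sum
    · rw [pvStepA, if_pos hc, ih]
      rw [PySem.Dict.contains_eq_isSome_get?] at hc
      constructor
      · rintro (h | h)
        · exact Or.inl h
        · exact Or.inr (Or.inr h)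
      · rintro (h | h | h)
        · exact Or.inl h
        · subst h; exact Or.inl hc
        · exact Or.inr h
    · rw [pvStepA, if_neg hc]
      have key : ∀ (d2 : PySem.Dict Int Int), d2 = d.insert t.sum (PySem.Int.mod t.sum modulo) →
          ∀ mx2, (((ts.foldl (pvStepA modulo) (d2, mx2)).1).get? total).isSome
            ↔ (d.get? total).isSome ∨ total = t.sum ∨ total ∈ ts.map List.sum := by
        rintro d2 rfl mx2
        rw [ih]
        by_cases ht : total = t.sum
        · subst ht; simp [PySem.Dict.get?_insert_self]
        · rw [PySem.Dict.get?_insert_of_ne _ _ ht]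
          tauto
      by_cases hgt : PySem.Int.mod t.sum modulo > mx
      · rw [if_pos hgt]; exact key _ rfl _
      · rw [if_neg hgt]; exact key _ rfl _

def pvInv (modulo : Int) (d : PySem.Dict Int Int) (mx : Int) : Prop :=
  0 ≤ mx ∧ (mx = 0 ∨ ∃ total, (d.get? total).isSome ∧ mx = PySem.Int.mod total modulo) ∧
    ∀ total, (d.get? total).isSome → PySem.Int.mod total modulo ≤ mx

theorem pv_fold_inv (modulo : Int) :
    ∀ (ts : List (List Int)) (d : PySem.Dict Int Int) (mx : Int), pvInv modulo d mx →
      pvInv modulo (ts.foldl (pvStepA modulo) (d, mx)).1 (ts.foldl (pvStepA modulo) (d, mx)).2 := by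
  intro ts
  induction ts with
  | nil => intro d mx h; simpa using h
  | cons t ts ih =>
    intro d mx h
    obtain ⟨h0, hw, hb⟩ := h
    simp only [List.foldl_cons]
    by_cases hc : d.contains t.sum
    · rw [pvStepA, if_pos hc]; exact ih d mx ⟨h0, hw, hb⟩
    · rw [pvStepA, if_neg hc]
      by_cases hgt : PySem.Int.mod t.sum modulo > mx
      · rw [if_pos hgt]
        apply ih
        refine ⟨le_trans h0 (le_of_lt hgt), Or.inr ⟨t.sum, by simp [PySem.Dict.get?_insert_self], rfl⟩, ?_⟩
        intro total hsome
        by_cases ht : total = t.sum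
        · subst ht; exact le_refl _
        · rw [PySem.Dict.get?_insert_of_ne _ _ ht] at hsome
          exact le_of_lt (lt_of_le_of_lt (hb total hsome) hgt)
      · rw [if_neg hgt]
        apply ih
        refine ⟨h0, ?_, ?_⟩
        · rcases hw with h | ⟨tot, hs, rfl⟩
          · exact Or.inl h
          · refine Or.inr ⟨tot, ?_, rfl⟩
            by_cases ht : tot = t.sum
            · subst ht; simp [PySem.Dict.get?_insert_self]
            · rw [PySem.Dict.get?_insert_of_ne _ _ ht]; exact hs
        · intro total hsome
          by_cases ht : total = t.sum
          · subst ht; exact le_of_not_gt hgt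
          · rw [PySem.Dict.get?_insert_of_ne _ _ ht] at hsome
            exact hb total hsome

theorem pv_main (lines : List (List Int)) (modulo : Int) (hne : lines ≠ []) :
    find_max_modulo_py lines modulo = find_max_modulo_py_alt lines modulo := by
  rw [pvA_eq, pvB_eq]
  set v := ((buildRecursiveSums lines []).foldl (pvStepA modulo) (PySem.Dict.empty, 0)).2 with hv
  set residues := lines.foldl (pvStepB modulo) (PySem.Set.ofList [0]) with hres
  set L : PySem.Set Int := PySem.Set.union residues (PySem.Set.ofList [0]) with hLdef
  have hfold : ∀ u : List Int, u ≠ [] →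
      u.foldl (fun acc n => PySem.Int.mod (acc + n) modulo) 0 = PySem.Int.mod u.sum modulo := by
    intro u hu
    cases u with
    | nil => exact absurd rfl hu
    | cons n u' =>
      have h1 : (fun acc n => PySem.Int.mod (acc + n) modulo) 0 n = PySem.Int.mod n modulo := by
        simp
      simp only [List.foldl_cons, h1, pv_modfold, List.sum_cons]
  have hsel_ne : ∀ u : List Int, pvSel lines u → u ≠ [] := by
    intro u hu h
    subst h
    cases hu
    exact hne rfl
  have hmemres : ∀ x : Int, x ∈ residues ↔
      ∃ u, pvSel lines u ∧ x = PySem.Int.mod u.sum modulo := by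
    intro x
    rw [hres, pv_dp_mem]
    constructor
    · rintro ⟨r, hr, u, hu, rfl⟩
      rw [PySem.Set.mem_ofList] at hr
      simp only [List.mem_singleton] at hr
      subst hr
      exact ⟨u, hu, (hfold u (hsel_ne u hu)).symm ▸ rfl⟩
    · rintro ⟨u, hu, rfl⟩
      refine ⟨0, by rw [PySem.Set.mem_ofList]; simp, u, hu, (hfold u (hsel_ne u hu)).symm⟩
  -- A-side facts
  have hempget : ∀ total : Int, ((PySem.Dict.empty : PySem.Dict Int Int).get? total) = none :=
    fun _ => rfl
  obtain ⟨hA0, hAw, hAb⟩ := pv_fold_inv modulo (buildRecursiveSums lines []) PySem.Dict.empty 0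
    ⟨le_refl 0, Or.inl rfl, by intro total hsome; rw [hempget] at hsome; simp at hsome⟩
  have hsum_iff : ∀ total : Int, total ∈ (buildRecursiveSums lines []).map List.sum ↔
      ∃ u, pvSel lines u ∧ total = u.sum := by
    intro total
    simp only [List.mem_map]
    constructor
    · rintro ⟨t, ht, rfl⟩
      obtain ⟨u, hu, htu⟩ := (pv_bRS_mem lines hne [] t).1 ht
      rw [List.nil_append] at htu
      subst htu
      exact ⟨_, hu, rfl⟩
    · rintro ⟨u, hu, rfl⟩
      exact ⟨u, (pv_bRS_mem lines hne [] u).2 ⟨u, hu, by simp⟩, rfl⟩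
  have hkeys : ∀ total : Int,
      ((((buildRecursiveSums lines []).foldl (pvStepA modulo) (PySem.Dict.empty, 0)).1).get? total).isSome
        ↔ ∃ u, pvSel lines u ∧ total = u.sum := by
    intro total
    rw [pv_fold_keys modulo _ PySem.Dict.empty 0 total, hempget, hsum_iff]
    simp
  have hA1 : v = 0 ∨ ∃ u, pvSel lines u ∧ v = PySem.Int.mod u.sum modulo := by
    rcases hAw with h | ⟨total, hsome, hveq⟩
    · exact Or.inl h
    · rw [hkeys] at hsome
      obtain ⟨u, hu, rfl⟩ := hsome
      exact Or.inr ⟨u, hu, hveq⟩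
  have hA2 : ∀ u, pvSel lines u → PySem.Int.mod u.sum modulo ≤ v := by
    intro u hu
    exact hAb u.sum ((hkeys u.sum).2 ⟨u, hu, rfl⟩)
  -- B-side facts
  have h0L : (0 : Int) ∈ L := by
    rw [hLdef, PySem.Set.mem_union]
    right
    rw [PySem.Set.mem_ofList]
    simp
  obtain ⟨w, hw⟩ : ∃ w, PySem.List.max? L (fun x => x) = some w := by
    cases hmax : PySem.List.max? L (fun x => x) with
    | none =>
      rw [PySem.List.max?_eq_none_iff] at hmax
      rw [hmax] at h0L
      simp at h0L
    | some w => exact ⟨w, rfl⟩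
  have hwmem := PySem.List.max?_mem hw
  have hwmax : ∀ y ∈ L, y ≤ w := fun y hy => PySem.List.max?_isMax hw y hy
  have h0w : (0 : Int) ≤ w := hwmax 0 h0L
  have hB1 : w = 0 ∨ ∃ u, pvSel lines u ∧ w = PySem.Int.mod u.sum modulo := by
    rw [hLdef, PySem.Set.mem_union] at hwmem
    rcases hwmem with h | h
    · exact Or.inr ((hmemres w).1 h)
    · rw [PySem.Set.mem_ofList] at h
      simp only [List.mem_singleton] at h
      exact Or.inl h
  have hB2 : ∀ u, pvSel lines u → PySem.Int.mod u.sum modulo ≤ w := by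
    intro u hu
    apply hwmax
    rw [hLdef, PySem.Set.mem_union]
    exact Or.inl ((hmemres _).2 ⟨u, hu, rfl⟩)
  rw [hw]
  apply le_antisymm
  · rcases hA1 with h | ⟨u, hu, hveq⟩
    · rw [h]; exact h0w
    · rw [hveq]; exact hB2 u hu
  · rcases hB1 with h | ⟨u, hu, hweq⟩
    · rw [h]; exact hA0
    · rw [hweq]; exact hA2 u hu

-- ===== VERDICT (by name: the statement is the Claim_ definition above) =====
theorem find_max_modulo_py_spec : Claim_equal_find_max_modulo_py := by
  intro lines modulo _ hpre
  unfold Spec_find_max_modulo_py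
  exact pv_main lines modulo hpre.1
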